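-- pv_equiv track=rewrite | github.com/kambidi1973/webrtc-sip-bridge | gateway/sip/stack.py | _extract_media_from_sdp
-- ===== SOURCE A (Python) =====
-- from typing import Callable, Dict, List, Optional, Tuple
--
-- def _extract_media_from_sdp(sdp: str) -> Tuple[Optional[str], Optional[int]]:
--     """Extract media address and port from SDP body."""
--     address = None
--     port = None
--
--     for line in sdp.split("\n"):
--         line = line.strip()
--         if line.startswith("c=IN IP4 "):
--             address = line.split()[-1]
--         elif line.startswith("m=audio "):
--             parts = line.split()
--             if len(parts) >= 2:
--                 try:
--                     port = int(parts[1])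
--                 except ValueError:
--                     pass
--
--     return address, port
-- ===== SOURCE B (Python) =====
-- def _extract_media_from_sdp(sdp):
--     """Extract media address and port from SDP body (two-pass, comprehension-based)."""
--     lines = [raw.strip() for raw in sdp.split("\n")]
--
--     addresses = [line.split()[-1] for line in lines if line.startswith("c=IN IP4 ")]
--     address = addresses[-1] if addresses else None
--
--     def parse_port(line):
--         parts = line.split()
--         if len(parts) >= 2:
--             try:
--                 return int(parts[1])
--             except ValueError:
--                 return None
--         return None
--
--     ports = [p for p in (parse_port(line) for line in lines if line.startswith("m=audio ")) if p is not None]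
--     port = ports[-1] if ports else None
--     return address, port
-- ===== Notes on version B (the rewrite author's own statement) =====
-- stated objective: alternative
-- what changed: A's single stateful loop carrying (address, port) is replaced by two independent comprehension-style passes: filter the c=IN IP4 lines and take the last address, filter the m=audio lines, parse each port (skipping unparsable ones) and take the last surviving value.
import Mathlib
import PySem

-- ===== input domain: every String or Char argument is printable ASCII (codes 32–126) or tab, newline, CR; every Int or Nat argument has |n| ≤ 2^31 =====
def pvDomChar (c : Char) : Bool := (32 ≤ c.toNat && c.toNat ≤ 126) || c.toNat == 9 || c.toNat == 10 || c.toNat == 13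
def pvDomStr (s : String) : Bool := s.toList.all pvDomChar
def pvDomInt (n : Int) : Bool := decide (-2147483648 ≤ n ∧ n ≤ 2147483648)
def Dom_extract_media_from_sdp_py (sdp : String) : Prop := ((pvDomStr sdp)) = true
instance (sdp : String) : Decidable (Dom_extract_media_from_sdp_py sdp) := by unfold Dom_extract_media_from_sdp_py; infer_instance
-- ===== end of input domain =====

-- B replaces A's single stateful loop by two comprehension-style passes (filter + extract, last survivor); objective: alternative decomposition, same cost.

-- ===== PORT A =====
-- single fold over the lines (sdp.split("\n")) with (address, port) state, branches in A's order
def extract_media_from_sdp_py (sdp : String) : Option String × Option Int :=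
  (PySem.Chars.splitOn sdp.toList ['\n']).foldl
    (fun st rawLine =>
      let line := PySem.Chars.strip rawLine
      if PySem.Chars.startswith line "c=IN IP4 ".toList then
        -- address = line.split()[-1]; split() is provably nonempty here (the line starts
        -- with 'c'), so Python's IndexError is unreachable; getLast? is exact on this input
        (match (PySem.Chars.split₀ line).getLast? with
         | some a => (some (String.ofList a), st.2)
         | none => st)
      else if PySem.Chars.startswith line "m=audio ".toList then
        let parts := PySem.Chars.split₀ line
        (match parts with
         | _ :: p :: _ =>
           -- try: port = int(parts[1]) except ValueError: pass
           (match PySem.Int.ofChars? p with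
            | some v => (st.1, some v)
            | none => st)
         | _ => st)
      else st)
    (none, none)

-- ===== PORT B =====
-- the parse_port helper of Source B
def pvParsePort (line : List Char) : Option Int :=
  let parts := PySem.Chars.split₀ line
  if 2 ≤ parts.length then PySem.Int.ofChars? (parts.getD 1 []) else none

def extract_media_from_sdp_py_alt (sdp : String) : Option String × Option Int :=
  let lines := (PySem.Chars.splitOn sdp.toList ['\n']).map PySem.Chars.strip
  let addresses := (lines.filter (fun l => PySem.Chars.startswith l "c=IN IP4 ".toList)).filterMap
    (fun l => (PySem.Chars.split₀ l).getLast?)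
  let ports := (lines.filter (fun l => PySem.Chars.startswith l "m=audio ".toList)).filterMap pvParsePort
  ((addresses.getLast?).map String.ofList, ports.getLast?)

-- ===== PRECONDITION & SPEC =====
def Spec_extract_media_from_sdp_py (sdp : String) (out : Option String × Option Int) : Prop := out = extract_media_from_sdp_py_alt sdp
instance (sdp : String) (out : Option String × Option Int) : Decidable (Spec_extract_media_from_sdp_py sdp out) := by unfold Spec_extract_media_from_sdp_py; infer_instance

-- ===== CLAIM (what is proved, stated in full; the proofs are below) =====
def Claim_equal_extract_media_from_sdp_py : Prop := ∀ (sdp : String), Dom_extract_media_from_sdp_py sdp → Spec_extract_media_from_sdp_py sdp (extract_media_from_sdp_py sdp)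

-- ===== LEMMAS AND PROOFS =====

-- A's loop body (already applied to the stripped line), named for the proofs
def pvStepA (st : Option String × Option Int) (line : List Char) : Option String × Option Int :=
  if PySem.Chars.startswith line "c=IN IP4 ".toList then
    (match (PySem.Chars.split₀ line).getLast? with
     | some a => (some (String.ofList a), st.2)
     | none => st)
  else if PySem.Chars.startswith line "m=audio ".toList then
    (match PySem.Chars.split₀ line with
     | _ :: p :: _ =>
       (match PySem.Int.ofChars? p with
        | some v => (st.1, some v)
        | none => st)
     | _ => st)
  else st

-- the two per-line extractors of the fused (filter-then-filterMap) passes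
def pvAddrOf (l : List Char) : Option (List Char) :=
  if PySem.Chars.startswith l "c=IN IP4 ".toList then (PySem.Chars.split₀ l).getLast? else none
def pvPortOf (l : List Char) : Option Int :=
  if PySem.Chars.startswith l "m=audio ".toList then pvParsePort l else none

lemma pvGetLast?_cons_or {α : Type} (x : α) (xs : List α) :
    (x :: xs).getLast? = (xs.getLast?).or (some x) := by
  cases h : xs.getLast? <;> simp [List.getLast?_cons, h]

-- a line cannot start with both markers (their first characters differ)
lemma pvStarts_excl (l : List Char) (h : PySem.Chars.startswith l "c=IN IP4 ".toList = true) :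
    PySem.Chars.startswith l "m=audio ".toList = false := by
  by_contra hm
  simp only [Bool.not_eq_false] at hm
  rw [PySem.Chars.startswith_iff] at h hm
  rcases h with ⟨t1, h1⟩
  rcases hm with ⟨t2, h2⟩
  rw [show ("c=IN IP4 ".toList) = 'c' :: "=IN IP4 ".toList from rfl] at h1
  rw [show ("m=audio ".toList) = 'm' :: "=audio ".toList from rfl] at h2
  rw [← h1] at h2
  simp at h2

-- one step of A's fold = the Option.or update of both passes
lemma pvStepA_eq (st : Option String × Option Int) (l : List Char) :
    pvStepA st l = (((pvAddrOf l).map String.ofList).or st.1, (pvPortOf l).or st.2) := by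
  unfold pvStepA pvAddrOf pvPortOf pvParsePort
  by_cases hc : PySem.Chars.startswith l "c=IN IP4 ".toList = true
  · rw [pvStarts_excl l hc]
    simp only [hc, if_pos, Bool.false_eq_true, if_false]
    cases h : (PySem.Chars.split₀ l).getLast? with
    | some a => simp
    | none =>
      -- unreachable in Python (split() of a line starting with 'c' is nonempty);
      -- both sides then keep st.1
      simp
  · simp only [Bool.not_eq_true] at hc
    simp only [hc, Bool.false_eq_true, if_false]
    by_cases hm : PySem.Chars.startswith l "m=audio ".toList = true
    · simp only [hm, if_pos]
      cases hp : PySem.Chars.split₀ l with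
      | nil => simp
      | cons x xs =>
        cases xs with
        | nil => simp
        | cons p rest =>
          cases hv : PySem.Int.ofChars? p <;> simp [hv]
    · simp only [Bool.not_eq_true] at hm
      have hm' : PySem.Chars.startswith l ['m', '=', 'a', 'u', 'd', 'i', 'o', ' '] = false := hm
      simp [hm']

-- fold invariant: A's fold computes the last surviving value of each pass, or'd onto the seed
lemma pvFold_inv (ls : List (List Char)) (a : Option String) (p : Option Int) :
    ls.foldl pvStepA (a, p) =
      ((((ls.filterMap pvAddrOf).getLast?).map String.ofList).or a,
       ((ls.filterMap pvPortOf).getLast?).or p) := by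
  induction ls generalizing a p with
  | nil => simp
  | cons l ls ih =>
    simp only [List.foldl_cons, pvStepA_eq, ih, List.filterMap_cons]
    cases h : pvAddrOf l <;> cases h2 : pvPortOf l <;>
      cases h3 : (ls.filterMap pvAddrOf).getLast? <;> cases h4 : (ls.filterMap pvPortOf).getLast? <;>
        simp [pvGetLast?_cons_or, h3, h4]

-- ===== VERDICT (by name: the statement is the Claim_ definition above) =====
theorem extract_media_from_sdp_py_spec : Claim_equal_extract_media_from_sdp_py := by
  intro sdp _
  show extract_media_from_sdp_py sdp = extract_media_from_sdp_py_alt sdp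
  have h := pvFold_inv ((PySem.Chars.splitOn sdp.toList ['\n']).map PySem.Chars.strip) none none
  rw [List.foldl_map] at h
  refine Eq.trans (Eq.trans rfl h) ?_
  simp [extract_media_from_sdp_py_alt, List.filterMap_filter, pvAddrOf, pvPortOf]
  exact ⟨rfl, rfl⟩
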